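-- pv_equiv track=rewrite | github.com/pypi-data/pypi-mirror-9 | packages/li-autenticador/li-autenticador-0.0.5.tar.gz/li-autenticador-0.0.5/src/autenticacao_api/autenticador.py | extrai_chaves
-- ===== SOURCE A (Python) =====
-- def extrai_chaves(chaves, headers):
--     """
--     Tenta extrair as chaves de autenticação do cabeçalho HTTP passado. O cabeçalho deve conter um elemento AUTHORIZATION
--     :param chaves: Lista com as chaves que se espera existir no cabeçalho. As mesmas definidas com o Autenticador.define_valor(nome, valor)
--     :type chaves: list
--     :param headers: O cabeçalho HTTP
--     :type headers: dict
--     :return: As chaves extraídas do cabeçalho como um dicionário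
--     :rtype: dict
--     """
--     try:
--         authorization = headers["AUTHORIZATION"]
--     except KeyError:
--         return None
--     if not authorization:
--         return None
--     authorization = authorization.split()
--     if len(authorization) != len(chaves) * 2:
--         return None
--     resultado = {}
--     for chave in chaves:
--         if chave in authorization:
--             indice = authorization.index(chave) + 1
--             resultado[chave] = authorization[indice]
--     return resultado
-- ===== SOURCE B (Python) =====
-- def extrai_chaves(chaves, headers):
--     authorization = headers.get("AUTHORIZATION")
--     if not authorization:
--         return None
--     toks = authorization.split()
--     if len(toks) != 2 * len(chaves):
--         return None
--     wanted = set(chaves)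
--     found = {}
--     for i, tok in enumerate(toks):
--         if tok in wanted and tok not in found:
--             found[tok] = toks[i + 1]
--     return {chave: found[chave] for chave in chaves if chave in found}
-- ===== Notes on version B (the rewrite author's own statement) =====
-- stated objective: alternative
-- what changed: B inverts the traversal: instead of looping over the requested keys and scanning the token list with 'in'/'.index' per key, it makes one enumerate-driven pass over the tokens collecting the successor of each first occurrence of a requested key, then projects the collected values back into the requested-key order.
import Mathlib
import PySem

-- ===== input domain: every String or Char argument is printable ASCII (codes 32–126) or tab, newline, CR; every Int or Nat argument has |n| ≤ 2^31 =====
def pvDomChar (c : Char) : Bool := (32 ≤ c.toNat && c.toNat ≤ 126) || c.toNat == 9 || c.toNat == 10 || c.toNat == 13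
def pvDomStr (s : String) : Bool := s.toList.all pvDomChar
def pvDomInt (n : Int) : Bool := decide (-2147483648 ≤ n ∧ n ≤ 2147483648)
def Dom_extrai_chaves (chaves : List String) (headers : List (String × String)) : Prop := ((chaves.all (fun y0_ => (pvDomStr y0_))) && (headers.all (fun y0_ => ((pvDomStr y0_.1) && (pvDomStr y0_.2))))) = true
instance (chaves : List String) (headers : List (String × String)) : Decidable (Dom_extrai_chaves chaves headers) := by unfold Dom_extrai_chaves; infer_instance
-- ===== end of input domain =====

-- B inverts the traversal: one enumerate pass over the tokens collecting the successor of each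
-- first occurrence of a requested key, then a projection into requested-key order (objective: alternative).
-- ===== PORT A =====
def extrai_chaves (chaves : List String) (headers : List (String × String)) : Option (List (String × String)) :=
  match headers.lookup "AUTHORIZATION" with
  | none => none
  | some authorization =>
    if authorization = "" then none
    else
      let toks := PySem.Str.split₀ authorization
      if toks.length ≠ chaves.length * 2 then none
      else
        some ((chaves.foldl (fun resultado chave =>
          if chave ∈ toks then
            match PySem.List.index? toks chave with
            | some i =>
              match PySem.List.pyGet? toks ((i : Int) + 1) with
              | some v => resultado.insert chave v
              | none => resultado      -- IndexError in Python: excluded by Pre_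
            | none => resultado
          else resultado) PySem.Dict.empty).items)

-- ===== PORT B =====
def extrai_chaves_alt (chaves : List String) (headers : List (String × String)) : Option (List (String × String)) :=
  match headers.lookup "AUTHORIZATION" with
  | none => none
  | some authorization =>
    if authorization = "" then none
    else
      let toks := PySem.Str.split₀ authorization
      if toks.length ≠ 2 * chaves.length then none
      else
        let wanted := PySem.Set.ofList chaves
        let found := (PySem.List.enumerate toks).foldl (fun found p =>
          if PySem.Set.contains wanted p.2 && !found.contains p.2 then
            match PySem.List.pyGet? toks (p.1 + 1) with
            | some v => found.insert p.2 v
            | none => found      -- IndexError in Python: excluded by Pre_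
          else found) PySem.Dict.empty
        some ((chaves.foldl (fun d chave =>
          match found.get? chave with
          | some v => d.insert chave v
          | none => d) PySem.Dict.empty).items)

-- ===== PRECONDITION & SPEC =====
-- Pre_ excludes exactly the inputs on which Python A raises IndexError: a requested chave
-- whose first occurrence among the authorization tokens is the very last token.
def Pre_extrai_chaves (chaves : List String) (headers : List (String × String)) : Prop :=
  let toks := PySem.Str.split₀ ((headers.lookup "AUTHORIZATION").getD "")
  toks.length = chaves.length * 2 →
    ∀ chave ∈ chaves, chave ∈ toks → (PySem.List.index? toks chave).getD 0 + 1 < toks.length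
instance (chaves : List String) (headers : List (String × String)) : Decidable (Pre_extrai_chaves chaves headers) := by unfold Pre_extrai_chaves; infer_instance
def pvWitness_extrai_chaves : List String × (List (String × String)) :=
  (["k"], [("AUTHORIZATION", "k v")])

def Spec_extrai_chaves (chaves : List String) (headers : List (String × String)) (out : Option (List (String × String))) : Prop := out = extrai_chaves_alt chaves headers
instance (chaves : List String) (headers : List (String × String)) (out : Option (List (String × String))) : Decidable (Spec_extrai_chaves chaves headers out) := by unfold Spec_extrai_chaves; infer_instance

-- ===== CLAIM (what is proved, stated in full; the proofs are below) =====
def Claim_equal_extrai_chaves : Prop := ∀ (chaves : List String) (headers : List (String × String)), Dom_extrai_chaves chaves headers → Pre_extrai_chaves chaves headers → Spec_extrai_chaves chaves headers (extrai_chaves chaves headers)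

-- ===== LEMMAS AND PROOFS =====

-- the value B's scan would record for key k while walking the pair list ps (first hit wins,
-- a failed toks[i+1] lookup leaves the accumulator unchanged and the scan continues)
def pvE (toks : List String) : List (Int × String) → String → Option String
  | [], _ => none
  | p :: rest, k =>
    if p.2 = k then (PySem.List.pyGet? toks (p.1 + 1)).or (pvE toks rest k) else pvE toks rest k

lemma pvScan_get? (toks wanted : List String) (ps : List (Int × String))
    (d : PySem.Dict String String) (k : String) :
    (ps.foldl (fun found p =>
        if PySem.Set.contains wanted p.2 && !found.contains p.2 then
          match PySem.List.pyGet? toks (p.1 + 1) with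
          | some v => found.insert p.2 v
          | none => found
        else found) d).get? k
      = (d.get? k).or (if PySem.Set.contains wanted k then pvE toks ps k else none) := by
  induction ps generalizing d with
  | nil => cases h : d.get? k <;> simp [pvE, h]
  | cons p rest ih =>
    obtain ⟨i, t⟩ := p
    simp only [List.foldl_cons, ih]
    by_cases hw : PySem.Set.contains wanted t
    · have hw' : t ∈ wanted := (PySem.Set.contains_iff _ _).mp hw
      by_cases hc : d.contains t
      · simp only [hw, hc, Bool.not_true, Bool.and_false]
        by_cases hk : t = k
        · subst hk
          have hs : (d.get? t).isSome := by rw [← PySem.Dict.contains_eq_isSome_get?]; exact hc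
          obtain ⟨v, hv⟩ := Option.isSome_iff_exists.mp hs
          simp [hv]
        · simp [pvE, hk]
      · simp only [Bool.not_eq_true] at hc
        have hnone : d.get? t = none := by
          cases h : d.get? t with
          | none => rfl
          | some v =>
            have : d.contains t = true := by rw [PySem.Dict.contains_eq_isSome_get?, h]; rfl
            rw [hc] at this; cases this
        simp only [hw, hc, Bool.not_false, Bool.and_true, if_true]
        cases hg : PySem.List.pyGet? toks (i + 1) with
        | some v =>
          by_cases hk : t = k
          · subst hk
            simp [PySem.Dict.get?_insert_self, hnone, hw', pvE, hg]
          · have hne : k ≠ t := fun h => hk h.symm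
            simp [PySem.Dict.get?_insert_of_ne d v hne, pvE, hk]
        | none =>
          by_cases hk : t = k
          · subst hk; simp [hnone, hw', pvE, hg]
          · simp [pvE, hk]
    · have hw' : t ∉ wanted := fun h => hw ((PySem.Set.contains_iff _ _).mpr h)
      simp only [hw, Bool.false_and]
      by_cases hk : t = k
      · subst hk; simp [hw']
      · simp [pvE, hk]

-- pvE over the enumeration of a suffix computes A's 'toks[toks.index(k)+1]' on that suffix
lemma pvE_enumerate (pre suf : List String) (k : String) :
    pvE (pre ++ suf) (PySem.List.enumerate suf (pre.length : Int)) k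
      = match PySem.List.index? suf k with
        | none => none
        | some m => PySem.List.pyGet? (pre ++ suf) ((pre.length : Int) + (m : Int) + 1) := by
  induction suf generalizing pre with
  | nil => simp [PySem.List.enumerate_nil, pvE, PySem.List.index?_eq_idxOf?]
  | cons t rest ih =>
    rw [PySem.List.enumerate_cons]
    by_cases hk : t = k
    · subst hk
      rw [PySem.List.index?_cons_self]
      simp only [pvE, if_true]
      cases hg : PySem.List.pyGet? (pre ++ t :: rest) ((pre.length : Int) + 1) with
      | some v => simp [hg]
      | none =>
        -- index pre.length+1 out of range forces rest = []
        have hrange := (PySem.List.pyGet?_eq_none_iff _ _).mp hg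
        have hrest : rest = [] := by
          rcases rest with _ | ⟨u, us⟩
          · rfl
          · exfalso; apply hrange
            constructor <;> simp <;> try omega
        subst hrest
        simp [hg, PySem.List.enumerate_nil, pvE]
    · rw [PySem.List.index?_cons_of_ne _ hk]
      simp only [pvE, if_neg hk]
      have hcast : (pre.length : Int) + 1 = ((pre ++ [t]).length : Int) := by
        simp
      have := ih (pre ++ [t])
      rw [hcast]
      rw [List.append_cons pre t rest]
      rw [this]
      cases hidx : PySem.List.index? rest k with
      | none => simp
      | some m =>
        simp only [Option.map_some]
        congr 1
        simp
        omega

theorem extrai_chaves_spec : Claim_equal_extrai_chaves := by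
  intro chaves headers _hDom _hPre
  unfold Spec_extrai_chaves extrai_chaves extrai_chaves_alt
  cases hA : headers.lookup "AUTHORIZATION" with
  | none => rfl
  | some auth =>
    by_cases hE : auth = ""
    · simp [hE]
    · simp only [hE, if_false]
      by_cases hL : (PySem.Str.split₀ auth).length = chaves.length * 2
      · have hL2 : ¬ (PySem.Str.split₀ auth).length ≠ 2 * chaves.length := by omega
        have hL1 : ¬ (PySem.Str.split₀ auth).length ≠ chaves.length * 2 := by omega
        simp only [hL1, hL2, if_false]
        congr 1
        apply congrArg
        apply PySem.List.foldl_congr_mem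
        intro d ch _hch
        rw [pvScan_get?]
        have hwk : PySem.Set.contains (PySem.Set.ofList chaves) ch = true := by
          rw [PySem.Set.contains_iff]
          exact (PySem.Set.mem_ofList _ _).mpr _hch
        have hEe : pvE (PySem.Str.split₀ auth)
            (PySem.List.enumerate (PySem.Str.split₀ auth) ((List.length ([] : List String) : Int))) ch
              = match PySem.List.index? (PySem.Str.split₀ auth) ch with
                | none => none
                | some m => PySem.List.pyGet? (PySem.Str.split₀ auth)
                    (((List.length ([] : List String)) : Int) + (m : Int) + 1) := by
          have := pvE_enumerate [] (PySem.Str.split₀ auth) ch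
          simpa using this
        simp only [List.length_nil, Nat.cast_zero] at hEe
        have hEe' : pvE (PySem.Str.split₀ auth)
            (PySem.List.enumerate (PySem.Str.split₀ auth) 0) ch
              = match PySem.List.index? (PySem.Str.split₀ auth) ch with
                | none => none
                | some m => PySem.List.pyGet? (PySem.Str.split₀ auth) ((m : Int) + 1) := by
          rw [hEe]
          cases PySem.List.index? (PySem.Str.split₀ auth) ch <;> simp
        simp only [PySem.Dict.get?_empty, Option.none_or, hwk, if_true, hEe']
        by_cases hmem : ch ∈ PySem.Str.split₀ auth
        · simp only [hmem, if_true]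
          obtain ⟨i, hi⟩ := Option.isSome_iff_exists.mp
            ((PySem.List.index?_isSome_iff _ _).mpr hmem)
          rw [hi]
        · simp only [hmem, if_false]
          rw [(PySem.List.index?_eq_none_iff _ _).mpr hmem]
      · have h1 : (PySem.Str.split₀ auth).length ≠ chaves.length * 2 := hL
        have h2 : (PySem.Str.split₀ auth).length ≠ 2 * chaves.length := by omega
        simp [h1, h2]
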